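-- pv_equiv track=rewrite | github.com/LandairNYC/automated-comps | scripts/sync_leads_to_airtable.py | resolve_linked_records
-- ===== SOURCE A (Python) =====
-- from typing import Optional, Dict
--
-- LINKED_COMP_FIELDS = [
--     "Closest Comp 1",
--     "Closest Comp 2",
--     "Closest Comp 3",
--     "Closest Comp 4",
--     "Closest Comp 5",
--     "Closest Comp 6",
-- ]
--
-- def resolve_linked_records(
--     bbl_string: Optional[str],
--     bbl_map: Dict[str, str],
-- ) -> Dict[str, list]:
--     """
--     Given a pipe-delimited BBL string:
--       "3-02156-0005|3-01324-0014|3-03565-0030|2-02869-0027|4-00865-0033|1-00177-0028"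
--
--     Return a dict of Airtable field updates for linked records:
--       {
--         "Closest Comp 1": ["recXXXXXXXXXXXXXX"],
--         "Closest Comp 2": ["recYYYYYYYYYYYYYY"],
--         ...
--       }
--
--     Skips any BBL not found in CompScope Beta — this happens when the nearest
--     comp is a Residential Property excluded from the CompScope sync filter.
--     """
--     if not bbl_string:
--         return {}
--
--     bbls   = [b.strip() for b in bbl_string.split("|") if b.strip()]
--     linked = {}
--     slot   = 0  # Track which Closest Comp field we're filling
--
--     for bbl in bbls:
--         if slot >= len(LINKED_COMP_FIELDS):
--             break
--         rec_id = bbl_map.get(bbl)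
--         if rec_id:
--             linked[LINKED_COMP_FIELDS[slot]] = [rec_id]
--             slot += 1
--
--     return linked
-- ===== SOURCE B (Python) =====
-- from typing import Optional, Dict
--
-- LINKED_COMP_FIELDS = [
--     "Closest Comp 1",
--     "Closest Comp 2",
--     "Closest Comp 3",
--     "Closest Comp 4",
--     "Closest Comp 5",
--     "Closest Comp 6",
-- ]
--
-- def resolve_linked_records(
--     bbl_string: Optional[str],
--     bbl_map: Dict[str, str],
-- ) -> Dict[str, list]:
--     if not bbl_string:
--         return {}
--
--     def fill(fields, parts):
--         # recurse on the remaining field slots and raw tokens simultaneously: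
--         # a resolvable token consumes a field, an unresolvable one is skipped
--         if not fields or not parts:
--             return {}
--         bbl = parts[0].strip()
--         rid = bbl_map.get(bbl) if bbl else None
--         if rid:
--             out = {fields[0]: [rid]}
--             out.update(fill(fields[1:], parts[1:]))
--             return out
--         return fill(fields, parts[1:])
--
--     return fill(LINKED_COMP_FIELDS, bbl_string.split("|"))
-- ===== Notes on version B (the rewrite author's own statement) =====
-- stated objective: alternative
-- what changed: Replaces A's imperative loop with its slot counter, indexed field lookup, break and in-place dict mutation by a structural recursion that consumes the field list and the raw token list simultaneously, building the result dict top-down; no pre-filtered token list, no counter, no break.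
import Mathlib
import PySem

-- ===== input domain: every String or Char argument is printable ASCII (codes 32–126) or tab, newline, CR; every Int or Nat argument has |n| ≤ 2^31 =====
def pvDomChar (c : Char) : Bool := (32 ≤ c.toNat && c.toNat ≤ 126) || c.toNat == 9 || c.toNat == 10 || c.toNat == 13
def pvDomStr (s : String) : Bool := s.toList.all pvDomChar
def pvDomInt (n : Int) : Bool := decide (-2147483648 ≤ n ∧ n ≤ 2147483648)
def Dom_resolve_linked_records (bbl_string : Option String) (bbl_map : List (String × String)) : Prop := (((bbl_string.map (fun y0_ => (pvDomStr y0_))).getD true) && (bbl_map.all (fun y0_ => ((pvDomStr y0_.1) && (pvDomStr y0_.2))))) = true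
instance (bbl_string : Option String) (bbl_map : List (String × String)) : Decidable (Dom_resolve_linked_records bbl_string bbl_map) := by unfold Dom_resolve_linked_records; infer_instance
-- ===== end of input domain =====

-- B replaces A's slot counter, indexed field lookup, break and in-place dict mutation
-- by a structural recursion consuming fields and raw tokens together (objective: alternative).

-- module constant LINKED_COMP_FIELDS (shared by both ports)
def pvLinkedCompFields : List String :=
  ["Closest Comp 1", "Closest Comp 2", "Closest Comp 3",
   "Closest Comp 4", "Closest Comp 5", "Closest Comp 6"]

-- ===== PORT A =====
-- the for-loop over bbls with the slot counter and break
def pvLoopA (m : PySem.Dict String String) :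
    List String → PySem.Dict String (List String) → Nat → PySem.Dict String (List String)
  | [], linked, _ => linked
  | bbl :: rest, linked, slot =>
    if slot ≥ pvLinkedCompFields.length then linked   -- break
    else
      match m.get? bbl with
      | some rid =>
          if rid ≠ "" then
            pvLoopA m rest (linked.insert (pvLinkedCompFields.getD slot "") [rid]) (slot + 1)
          else pvLoopA m rest linked slot
      | none => pvLoopA m rest linked slot

def resolve_linked_records (bbl_string : Option String) (bbl_map : List (String × String)) : List (String × List String) :=
  match bbl_string with
  | none => []
  | some s =>
    if s = "" then []    -- 'if not bbl_string'
    else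
      let m := PySem.Dict.ofList bbl_map
      let bbls := (((PySem.Str.split? s "|").getD []).map (fun b => PySem.Str.strip b)).filter
                    (fun b => b ≠ "")
      (pvLoopA m bbls PySem.Dict.empty 0).items

-- ===== PORT B =====
-- B's inner 'fill': structural recursion on (fields, parts); the dict literal plus
-- update with the recursive result (whose keys come from fields.tail, all distinct
-- from fields.head) is exactly a cons in insertion order.
def pvFill (m : PySem.Dict String String) :
    List String → List String → List (String × List String)
  | [], _ => []
  | _ :: _, [] => []
  | f :: fs, p :: ps =>
    let bbl := PySem.Str.strip p
    match (if bbl = "" then none else m.get? bbl) with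
    | some rid =>
        if rid ≠ "" then (f, [rid]) :: pvFill m fs ps
        else pvFill m (f :: fs) ps
    | none => pvFill m (f :: fs) ps

def resolve_linked_records_alt (bbl_string : Option String) (bbl_map : List (String × String)) : List (String × List String) :=
  match bbl_string with
  | none => []
  | some s =>
    if s = "" then []
    else
      let m := PySem.Dict.ofList bbl_map
      pvFill m pvLinkedCompFields ((PySem.Str.split? s "|").getD [])

-- ===== PRECONDITION & SPEC =====
def Spec_resolve_linked_records (bbl_string : Option String) (bbl_map : List (String × String)) (out : List (String × List String)) : Prop := out = resolve_linked_records_alt bbl_string bbl_map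
instance (bbl_string : Option String) (bbl_map : List (String × String)) (out : List (String × List String)) : Decidable (Spec_resolve_linked_records bbl_string bbl_map out) := by unfold Spec_resolve_linked_records; infer_instance

-- ===== CLAIM (what is proved, stated in full; the proofs are below) =====
def Claim_equal_resolve_linked_records : Prop := ∀ (bbl_string : Option String) (bbl_map : List (String × String)), Dom_resolve_linked_records bbl_string bbl_map → Spec_resolve_linked_records bbl_string bbl_map (resolve_linked_records bbl_string bbl_map)

-- ===== LEMMAS AND PROOFS =====

-- the sequence of record ids both programs resolve, on already-stripped nonempty bbls
def pvRes (m : PySem.Dict String String) (bbls : List String) : List String :=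
  bbls.filterMap (fun bbl =>
    match m.get? bbl with
    | some rid => if rid = "" then none else some rid
    | none => none)

theorem pvFill_eq (m : PySem.Dict String String) (parts : List String) :
    ∀ fields : List String,
      pvFill m fields parts
        = (fields.zip (pvRes m ((parts.map (fun b => PySem.Str.strip b)).filter
            (fun b => b ≠ "")))).map (fun fr => (fr.1, [fr.2])) := by
  induction parts with
  | nil => intro fields; cases fields <;> simp [pvFill, pvRes]
  | cons p rest ih =>
    intro fields
    cases fields with
    | nil => simp [pvFill]
    | cons f fs =>
      by_cases hb : PySem.Str.strip p = ""
      · have : (List.filter (fun b => decide (b ≠ "")) ((p :: rest).map (fun b => PySem.Str.strip b)))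
            = List.filter (fun b => decide (b ≠ "")) (rest.map (fun b => PySem.Str.strip b)) := by
          simp [hb]
        rw [show pvFill m (f :: fs) (p :: rest) = pvFill m (f :: fs) rest from by
          simp [pvFill, hb]]
        rw [ih, this]
      · have hcons : (List.filter (fun b => decide (b ≠ "")) ((p :: rest).map (fun b => PySem.Str.strip b)))
            = PySem.Str.strip p :: List.filter (fun b => decide (b ≠ ""))
                (rest.map (fun b => PySem.Str.strip b)) := by simp [hb]
        rw [hcons]
        match hg : m.get? (PySem.Str.strip p) with
        | none =>
            rw [show pvFill m (f :: fs) (p :: rest) = pvFill m (f :: fs) rest from by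
              simp [pvFill, hb, hg]]
            rw [ih]
            simp only [pvRes, List.filterMap_cons, hg]
        | some rid =>
            by_cases hr : rid = ""
            · rw [show pvFill m (f :: fs) (p :: rest) = pvFill m (f :: fs) rest from by
                simp [pvFill, hb, hg, hr]]
              rw [ih]
              simp only [pvRes, List.filterMap_cons, hg, if_pos hr]
            · rw [show pvFill m (f :: fs) (p :: rest) = (f, [rid]) :: pvFill m fs rest from by
                simp [pvFill, hb, hg, hr]]
              rw [ih]
              simp only [pvRes, List.filterMap_cons, hg, if_neg hr, List.zip_cons_cons,
                List.map_cons]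

theorem pvLoopA_items (m : PySem.Dict String String) (bbls : List String) :
    ∀ (linked : PySem.Dict String (List String)) (slot : Nat),
      (pvLinkedCompFields.drop slot).Nodup →
      (∀ f ∈ pvLinkedCompFields.drop slot, linked.contains f = false) →
      (pvLoopA m bbls linked slot).items
        = linked.items ++ ((pvLinkedCompFields.drop slot).zip (pvRes m bbls)).map
            (fun fr => (fr.1, [fr.2])) := by
  induction bbls with
  | nil => intro linked slot _ _; simp [pvLoopA, pvRes]
  | cons bbl rest ih =>
    intro linked slot hnd hdis
    by_cases hslot : slot ≥ pvLinkedCompFields.length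
    · have hdrop : pvLinkedCompFields.drop slot = [] := List.drop_eq_nil_of_le hslot
      simp [pvLoopA, hslot, hdrop]
    · have hlt : slot < pvLinkedCompFields.length := by omega
      have hdrop : pvLinkedCompFields.drop slot
          = pvLinkedCompFields[slot] :: pvLinkedCompFields.drop (slot + 1) :=
        List.drop_eq_getElem_cons hlt
      have hgetD : pvLinkedCompFields.getD slot "" = pvLinkedCompFields[slot] :=
        List.getD_eq_getElem _ _ hlt
      unfold pvLoopA
      rw [if_neg hslot]
      match hg : m.get? bbl with
      | none =>
          show (pvLoopA m rest linked slot).items = _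
          rw [ih linked slot hnd hdis]
          simp only [pvRes, List.filterMap_cons, hg]
      | some rid =>
          show (if rid ≠ "" then
              pvLoopA m rest (linked.insert (pvLinkedCompFields.getD slot "") [rid]) (slot + 1)
            else pvLoopA m rest linked slot).items = _
          by_cases hr : rid = ""
          · rw [if_neg (by simp [hr]), ih linked slot hnd hdis]
            simp only [pvRes, List.filterMap_cons, hg, if_pos hr]
          · rw [if_pos (by simp [hr])]
            rw [hdrop] at hnd hdis
            have hnotmem : linked.contains (pvLinkedCompFields[slot]) = false :=
              hdis _ (List.mem_cons_self ..)
            have hitems :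
                (linked.insert (pvLinkedCompFields.getD slot "") [rid]).items
                  = linked.items ++ [(pvLinkedCompFields[slot], [rid])] := by
              rw [hgetD]
              exact PySem.Dict.items_insert_of_not_contains _ _ hnotmem
            rw [ih (linked.insert (pvLinkedCompFields.getD slot "") [rid]) (slot + 1)
                  hnd.of_cons
                  (by
                    intro f hf
                    have hne : f ≠ pvLinkedCompFields[slot] := by
                      rintro rfl; exact (List.nodup_cons.mp hnd).1 hf
                    rw [hgetD]
                    rw [PySem.Dict.contains_insert]
                    simp [hne, hdis f (List.mem_cons_of_mem _ hf)])]
            rw [hitems, hdrop]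
            simp only [pvRes, List.filterMap_cons, hg, if_neg hr, List.zip_cons_cons,
              List.map_cons, List.append_assoc, List.cons_append, List.nil_append]

theorem pvMain (s : String) (bbl_map : List (String × String)) (hs : ¬ s = "") :
    resolve_linked_records (some s) bbl_map = resolve_linked_records_alt (some s) bbl_map := by
  simp only [resolve_linked_records, resolve_linked_records_alt, if_neg hs]
  rw [pvFill_eq]
  rw [pvLoopA_items (PySem.Dict.ofList bbl_map) _ PySem.Dict.empty 0
        (by decide) (by intro f _; simp [PySem.Dict.contains_empty])]
  simp [PySem.Dict.empty]

-- ===== VERDICT (by name: the statement is the Claim_ definition above) =====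
theorem resolve_linked_records_spec : Claim_equal_resolve_linked_records := by
  intro bbl_string bbl_map _
  unfold Spec_resolve_linked_records
  match bbl_string with
  | none => rfl
  | some s =>
    by_cases hs : s = ""
    · subst hs; rfl
    · exact pvMain s bbl_map hs
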